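-- pv_equiv track=rewrite | github.com/1230505029/uretim_planlama_dp | uretim_planlama.py | uretim_planlama_suresi
-- ===== SOURCE A (Python) =====
-- from typing import List
--
-- def uretim_planlama_suresi(sureler: List[List[int]]) -> int:
--     """
--     sureler[i][j] = i. işin j. makinadaki işlem süresi
--     DP tablosu ile toplam minimum süre hesaplanır.
--     """
--     n = len(sureler)      # iş sayısı
--     m = len(sureler[0])   # makine sayısı
--
--     # DP tablosu
--     dp = [[0]*m for _ in range(n)]
--
--     # İlk işin ilk makinesinin süresi
--     dp[0][0] = sureler[0][0]
--
--     # İlk işin diğer makinelerdeki sürelerini doldur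
--     for j in range(1, m):
--         dp[0][j] = dp[0][j-1] + sureler[0][j]
--
--     # Diğer işler için ilk makinenin sürelerini doldur
--     for i in range(1, n):
--         dp[i][0] = dp[i-1][0] + sureler[i][0]
--
--     # Diğer hücreleri doldur (önceki iş ve önceki makine etkili)
--     for i in range(1, n):
--         for j in range(1, m):
--             dp[i][j] = max(dp[i-1][j], dp[i][j-1]) + sureler[i][j]
--
--     return dp[n-1][m-1]  # son işin son makinede bitiş süresi
-- ===== SOURCE B (Python) =====
-- from typing import List
--
-- def uretim_planlama_suresi(sureler: List[List[int]]) -> int: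
--     """Top-down memoization: finish times are computed on demand by descending from
--     the corner cell (n-1, m-1) along the recurrence, with an explicit work stack."""
--     n = len(sureler)
--     m = len(sureler[0])
--     memo = {}
--     stack = [(n - 1, m - 1)]
--     while stack:
--         i, j = stack[-1]
--         if (i, j) in memo:
--             stack.pop()
--             continue
--         up = (i - 1, j)
--         left = (i, j - 1)
--         todo = []
--         if i > 0 and up not in memo:
--             todo.append(up)
--         if j > 0 and left not in memo:
--             todo.append(left)
--         if todo:
--             stack.extend(todo)
--             continue
--         if i > 0 and j > 0:
--             v = max(memo[up], memo[left])
--         elif i > 0: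
--             v = memo[up]
--         elif j > 0:
--             v = memo[left]
--         else:
--             v = 0
--         memo[(i, j)] = v + sureler[i][j]
--         stack.pop()
--     return memo[(n - 1, m - 1)]
-- ===== Notes on version B (the rewrite author's own statement) =====
-- stated objective: alternative
-- what changed: A fills an n*m DP table bottom-up in three separate forward loop phases (first row, first column, interior) and reads the corner; B computes the corner value top-down by demand-driven memoization: it descends from (n-1,m-1) along the recurrence with an explicit work stack and a dict cache, so control flow is recursive descent over dependencies rather than a forward table fill.
import Mathlib
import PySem

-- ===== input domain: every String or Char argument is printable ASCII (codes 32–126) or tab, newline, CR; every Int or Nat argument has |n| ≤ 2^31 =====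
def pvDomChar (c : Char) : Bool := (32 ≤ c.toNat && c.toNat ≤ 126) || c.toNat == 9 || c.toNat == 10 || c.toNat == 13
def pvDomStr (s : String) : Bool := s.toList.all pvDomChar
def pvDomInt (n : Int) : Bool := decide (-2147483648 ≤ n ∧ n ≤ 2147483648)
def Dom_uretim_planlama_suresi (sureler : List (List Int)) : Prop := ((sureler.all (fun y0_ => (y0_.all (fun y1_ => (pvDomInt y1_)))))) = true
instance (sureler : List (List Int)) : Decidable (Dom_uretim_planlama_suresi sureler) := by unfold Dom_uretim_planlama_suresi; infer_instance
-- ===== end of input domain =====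

-- A fills the n×m DP table bottom-up in three forward loop phases and reads the corner; B computes the
-- corner value top-down by demand-driven memoization (explicit work stack + dict cache) — objective: alternative decomposition.

-- ===== PORT A =====
-- sureler[i][j]: exact under Pre_ (both indices are then nonnegative and in range); where Python would raise, Pre_ excludes the input
def pvGet (sureler : List (List Int)) (i j : Int) : Int :=
  PySem.List.pyGetD (PySem.List.pyGetD sureler i []) j 0

def uretim_planlama_suresi (sureler : List (List Int)) : Int :=
  let n : Int := sureler.length
  let m : Int := (PySem.List.pyGetD sureler 0 []).length
  let dp0 : Int → Int → Int := fun _ _ => 0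
  let dp1 : Int → Int → Int := fun i' j' => if i' = 0 ∧ j' = 0 then pvGet sureler 0 0 else dp0 i' j'
  let dp2 := (PySem.List.pyRange 1 m).foldl
      (fun dp j => fun i' j' => if i' = 0 ∧ j' = j then dp 0 (j-1) + pvGet sureler 0 j else dp i' j') dp1
  let dp3 := (PySem.List.pyRange 1 n).foldl
      (fun dp i => fun i' j' => if i' = i ∧ j' = 0 then dp (i-1) 0 + pvGet sureler i 0 else dp i' j') dp2
  let dp4 := (PySem.List.pyRange 1 n).foldl
      (fun dp i => (PySem.List.pyRange 1 m).foldl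
        (fun dp j => fun i' j' =>
          if i' = i ∧ j' = j then max (dp (i-1) j) (dp i (j-1)) + pvGet sureler i j else dp i' j') dp) dp3
  dp4 (n-1) (m-1)

-- ===== PORT B =====
-- the 'todo' list built inside the while-loop body of Source B (up-dependency first, then left, as appended)
def pvTodo (memo : PySem.Dict (Int × Int) Int) (c : Int × Int) : List (Int × Int) :=
  (if 0 < c.1 ∧ memo.contains (c.1 - 1, c.2) = false then [(c.1 - 1, c.2)] else [])
    ++ (if 0 < c.2 ∧ memo.contains (c.1, c.2 - 1) = false then [(c.1, c.2 - 1)] else [])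

-- the if/elif chain computing v in Source B (memo[...] lookups; keys are present when this branch runs)
def pvVal (memo : PySem.Dict (Int × Int) Int) (c : Int × Int) : Int :=
  if 0 < c.1 ∧ 0 < c.2 then max (memo.getD (c.1 - 1, c.2) 0) (memo.getD (c.1, c.2 - 1) 0)
  else if 0 < c.1 then memo.getD (c.1 - 1, c.2) 0
  else if 0 < c.2 then memo.getD (c.1, c.2 - 1) 0
  else 0

-- fuel bound for the while loop (pv_resolve below proves it is never exhausted); the loop itself
-- stops as soon as the stack is empty, exactly like Source B's 'while stack'
def pvFuel (i j : Int) : Nat := 3 ^ (i.toNat + j.toNat + 1)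

-- Source B's while loop: stack head = stack top; extend pushes todo so its last element ends on top
def pvRun (s : List (List Int)) : Nat → PySem.Dict (Int × Int) Int → List (Int × Int) → PySem.Dict (Int × Int) Int
  | 0, memo, _ => memo
  | _ + 1, memo, [] => memo
  | fuel + 1, memo, c :: rest =>
    if memo.contains c then pvRun s fuel memo rest
    else if pvTodo memo c ≠ [] then pvRun s fuel memo ((pvTodo memo c).reverse ++ c :: rest)
    else pvRun s fuel (memo.insert c (pvVal memo c + pvGet s c.1 c.2)) rest

def uretim_planlama_suresi_alt (sureler : List (List Int)) : Int :=
  let n : Int := sureler.length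
  let m : Int := (PySem.List.pyGetD sureler 0 []).length
  let memo := pvRun sureler (pvFuel (n-1) (m-1)) PySem.Dict.empty [(n-1, m-1)]
  memo.getD (n-1, m-1) 0

-- ===== PRECONDITION & SPEC =====
-- Pre_ excludes exactly the inputs on which Python A raises IndexError: the empty grid, an empty
-- first row, and grids in which some row is shorter than the first row.
def Pre_uretim_planlama_suresi (sureler : List (List Int)) : Prop :=
  sureler ≠ [] ∧ (sureler.headD []) ≠ [] ∧ ∀ row ∈ sureler, (sureler.headD []).length ≤ row.length
instance (sureler : List (List Int)) : Decidable (Pre_uretim_planlama_suresi sureler) := by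
  unfold Pre_uretim_planlama_suresi; infer_instance

def pvWitness_uretim_planlama_suresi : List (List Int) := [[1, 2], [3, 4]]

def Spec_uretim_planlama_suresi (sureler : List (List Int)) (out : Int) : Prop := out = uretim_planlama_suresi_alt sureler
instance (sureler : List (List Int)) (out : Int) : Decidable (Spec_uretim_planlama_suresi sureler out) := by unfold Spec_uretim_planlama_suresi; infer_instance

-- ===== CLAIM (what is proved, stated in full; the proofs are below) =====
def Claim_equal_uretim_planlama_suresi : Prop := ∀ (sureler : List (List Int)), Dom_uretim_planlama_suresi sureler → Pre_uretim_planlama_suresi sureler → Spec_uretim_planlama_suresi sureler (uretim_planlama_suresi sureler)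

-- ===== LEMMAS AND PROOFS =====
def pvg (s : List (List Int)) (i j : Nat) : Int := pvGet s (i:Int) (j:Int)

def pvF (g : Nat → Nat → Int) : Nat → Nat → Int
  | 0, 0 => g 0 0
  | 0, j+1 => pvF g 0 j + g 0 (j+1)
  | i+1, 0 => pvF g i 0 + g (i+1) 0
  | i+1, j+1 => max (pvF g i (j+1)) (pvF g (i+1) j) + g (i+1) (j+1)

lemma pvF_0s (g : Nat → Nat → Int) (j : Nat) (hj : 1 ≤ j) : pvF g 0 j = pvF g 0 (j-1) + g 0 j := by
  obtain ⟨j, rfl⟩ : ∃ k, j = k + 1 := ⟨j - 1, by omega⟩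
  simp [pvF]

lemma pvF_s0 (g : Nat → Nat → Int) (i : Nat) (hi : 1 ≤ i) : pvF g i 0 = pvF g (i-1) 0 + g i 0 := by
  obtain ⟨i, rfl⟩ : ∃ k, i = k + 1 := ⟨i - 1, by omega⟩
  simp [pvF]

lemma pvF_ss (g : Nat → Nat → Int) (i j : Nat) (hi : 1 ≤ i) (hj : 1 ≤ j) :
    pvF g i j = max (pvF g (i-1) j) (pvF g i (j-1)) + g i j := by
  obtain ⟨i, rfl⟩ : ∃ k, i = k + 1 := ⟨i - 1, by omega⟩
  obtain ⟨j, rfl⟩ : ∃ k, j = k + 1 := ⟨j - 1, by omega⟩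
  simp [pvF]

def pvC2 (g : Nat → Nat → Int) (m : Nat) : Int → Int → Int := fun i' j' =>
  if i' = 0 ∧ (j' = 0 ∨ (1 ≤ j' ∧ j' < (m : Int))) then pvF g 0 j'.toNat else 0

lemma pv_phase2 (s : List (List Int)) (m : Nat) :
  (PySem.List.pyRange 1 (m:Int)).foldl
      (fun dp j => fun i' j' => if i' = 0 ∧ j' = j then dp 0 (j-1) + pvGet s 0 j else dp i' j')
      (fun i' j' => if i' = 0 ∧ j' = 0 then pvGet s 0 0 else (0:Int))
  = pvC2 (pvg s) m := by
  induction m with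
  | zero =>
      funext i' j'
      have h0 : PySem.List.pyRange 1 ((0:Nat):Int) = [] := by decide
      rw [h0]
      simp only [List.foldl_nil, pvC2]
      by_cases hij : i' = 0 ∧ j' = 0
      · obtain ⟨hi, hj⟩ := hij; subst hi; subst hj
        norm_num [pvF, pvg]
      · rw [if_neg hij, if_neg (by push_cast; omega)]
  | succ m ih =>
      by_cases hm : m = 0
      · subst hm
        funext i' j'
        have h1 : PySem.List.pyRange 1 (((0:Nat)+1:Nat):Int) = [] := by decide
        rw [h1]
        simp only [List.foldl_nil, pvC2]
        by_cases hij : i' = 0 ∧ j' = 0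
        · obtain ⟨hi, hj⟩ := hij; subst hi; subst hj
          norm_num [pvF, pvg]
        · rw [if_neg hij, if_neg (by push_cast; omega)]
      · have hr : PySem.List.pyRange 1 (((m+1:Nat)):Int) = PySem.List.pyRange 1 (m:Int) ++ [(m:Int)] := by
          push_cast
          exact PySem.List.pyRange_one_succ_right (by omega)
        rw [hr, List.foldl_append, ih]
        funext i' j'
        simp only [List.foldl_cons, List.foldl_nil]
        by_cases hij : i' = 0 ∧ j' = (m:Int)
        · obtain ⟨hi, hj⟩ := hij; subst hi; subst hj
          rw [if_pos ⟨rfl, rfl⟩]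
          simp only [pvC2]
          have c1 : True ∧ ((m:Int) - 1 = 0 ∨ (1 ≤ (m:Int) - 1 ∧ (m:Int) - 1 < (m:Int))) := by
            refine ⟨trivial, ?_⟩
            by_cases h1 : m = 1
            · exact Or.inl (by omega)
            · exact Or.inr ⟨by omega, by omega⟩
          have c2 : True ∧ ((m:Int) = 0 ∨ (1 ≤ (m:Int) ∧ (m:Int) < ((m+1:Nat):Int))) := by
            exact ⟨trivial, Or.inr ⟨by omega, by push_cast; omega⟩⟩
          rw [if_pos c1, if_pos c2]
          have e1 : ((m:Int) - 1).toNat = m - 1 := by omega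
          have e2 : ((m:Int)).toNat = m := by omega
          rw [e1, e2, pvF_0s (pvg s) m (by omega)]
          have : pvg s 0 m = pvGet s 0 (m:Int) := rfl
          rw [this]
        · rw [if_neg hij]
          simp only [pvC2]
          by_cases h1 : i' = 0 ∧ (j' = 0 ∨ (1 ≤ j' ∧ j' < (m:Int)))
          · rw [if_pos h1, if_pos (by push_cast at h1 ⊢; omega)]
          · rw [if_neg h1, if_neg (by push_cast at h1 hij ⊢; omega)]

def pvC3 (g : Nat → Nat → Int) (n m : Nat) : Int → Int → Int := fun i' j' =>
  if 1 ≤ i' ∧ i' < (n : Int) ∧ j' = 0 then pvF g i'.toNat 0 else pvC2 g m i' j'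

lemma pv_phase3 (s : List (List Int)) (m n : Nat) :
  (PySem.List.pyRange 1 (n:Int)).foldl
      (fun dp i => fun i' j' => if i' = i ∧ j' = 0 then dp (i-1) 0 + pvGet s i 0 else dp i' j')
      (pvC2 (pvg s) m)
  = pvC3 (pvg s) n m := by
  induction n with
  | zero =>
      funext i' j'
      have h0 : PySem.List.pyRange 1 ((0:Nat):Int) = [] := by decide
      rw [h0]
      simp only [List.foldl_nil, pvC3]
      rw [if_neg (by intro h; push_cast at h; omega)]
  | succ n ih =>
      by_cases hn : n = 0
      · subst hn
        funext i' j'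
        have h1 : PySem.List.pyRange 1 (((0:Nat)+1:Nat):Int) = [] := by decide
        rw [h1]
        simp only [List.foldl_nil, pvC3]
        rw [if_neg (by intro h; push_cast at h; omega)]
      · have hr : PySem.List.pyRange 1 (((n+1:Nat)):Int) = PySem.List.pyRange 1 (n:Int) ++ [(n:Int)] := by
          push_cast
          exact PySem.List.pyRange_one_succ_right (by omega)
        rw [hr, List.foldl_append, ih]
        funext i' j'
        simp only [List.foldl_cons, List.foldl_nil]
        have hval : pvC3 (pvg s) n m ((n:Int)-1) 0 = pvF (pvg s) (n-1) 0 := by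
          by_cases hn1 : n = 1
          · subst hn1
            norm_num [pvC3, pvC2]
          · simp only [pvC3]
            rw [if_pos ⟨by omega, by omega, trivial⟩]
            have e1 : ((n:Int) - 1).toNat = n - 1 := by omega
            rw [e1]
        by_cases hij : i' = (n:Int) ∧ j' = 0
        · obtain ⟨hi, hj⟩ := hij; subst hi; subst hj
          rw [if_pos ⟨rfl, rfl⟩, hval]
          simp only [pvC3]
          rw [if_pos ⟨by omega, by push_cast; omega, trivial⟩]
          have e2 : ((n:Int)).toNat = n := by omega
          rw [e2, pvF_s0 (pvg s) n (by omega)]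
          rfl
        · rw [if_neg hij]
          simp only [pvC3]
          by_cases h1 : 1 ≤ i' ∧ i' < (n:Int) ∧ j' = 0
          · rw [if_pos h1, if_pos ⟨h1.1, by push_cast; omega, h1.2.2⟩]
          · rw [if_neg h1, if_neg (by intro h; push_cast at h hij h1; exact h1 ⟨h.1, by omega, h.2.2⟩)]

def pvC4 (g : Nat → Nat → Int) (n m k : Nat) : Int → Int → Int := fun i' j' =>
  if 1 ≤ i' ∧ i' < (k : Int) ∧ 1 ≤ j' ∧ j' < (m : Int) then pvF g i'.toNat j'.toNat
  else pvC3 g n m i' j'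

lemma pv_inner (s : List (List Int)) (n m k : Nat) (hk1 : 1 ≤ k) (hkn : k < n) (l : Nat) (hlm : l ≤ m) :
  (PySem.List.pyRange 1 (l:Int)).foldl
      (fun dp j => fun i' j' =>
        if i' = (k:Int) ∧ j' = j then max (dp ((k:Int)-1) j) (dp (k:Int) (j-1)) + pvGet s (k:Int) j else dp i' j')
      (pvC4 (pvg s) n m k)
  = fun i' j' => if i' = (k:Int) ∧ 1 ≤ j' ∧ j' < (l:Int) then pvF (pvg s) k j'.toNat
                 else pvC4 (pvg s) n m k i' j' := by
  induction l with
  | zero =>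
      funext i' j'
      have h0 : PySem.List.pyRange 1 ((0:Nat):Int) = [] := by decide
      rw [h0]
      simp only [List.foldl_nil]
      rw [if_neg (by intro h; push_cast at h; omega)]
  | succ l ih =>
      by_cases hl : l = 0
      · subst hl
        funext i' j'
        have h1 : PySem.List.pyRange 1 (((0:Nat)+1:Nat):Int) = [] := by decide
        rw [h1]
        simp only [List.foldl_nil]
        rw [if_neg (by intro h; push_cast at h; omega)]
      · have hr : PySem.List.pyRange 1 (((l+1:Nat)):Int) = PySem.List.pyRange 1 (l:Int) ++ [(l:Int)] := by
          push_cast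
          exact PySem.List.pyRange_one_succ_right (by omega)
        rw [hr, List.foldl_append, ih (by omega)]
        funext i' j'
        simp only [List.foldl_cons, List.foldl_nil]
        by_cases hij : i' = (k:Int) ∧ j' = (l:Int)
        · obtain ⟨hi, hj⟩ := hij; subst hi; subst hj
          rw [if_pos ⟨rfl, rfl⟩]
          have e1 : ((l:Int)).toNat = l := by omega
          have e2 : ((l:Int) - 1).toNat = l - 1 := by omega
          have e3 : ((k:Int)).toNat = k := by omega
          have e4 : ((k:Int) - 1).toNat = k - 1 := by omega
          simp only [pvC4, pvC3, pvC2, e1, e2, e3, e4, true_and]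
          rw [pvF_ss (pvg s) k l (by omega) (by omega)]
          split_ifs <;>
            first
              | (exfalso; omega)
              | (try (have hk' : k - 1 = 0 := (by omega)
                      rw [hk'])
                 try (have hl' : l - 1 = 0 := (by omega)
                      rw [hl'])
                 rfl)
        · rw [if_neg hij]
          by_cases h1 : i' = (k:Int) ∧ 1 ≤ j' ∧ j' < (l:Int)
          · rw [if_pos h1, if_pos ⟨h1.1, h1.2.1, by push_cast; omega⟩]
          · rw [if_neg h1, if_neg (by intro h; push_cast at h h1 hij; exact h1 ⟨h.1, h.2.1, by omega⟩)]

lemma pv_phase4 (s : List (List Int)) (n m : Nat) (k : Nat) (hk : k ≤ n) :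
  (PySem.List.pyRange 1 (k:Int)).foldl
      (fun dp i => (PySem.List.pyRange 1 (m:Int)).foldl
        (fun dp j => fun i' j' =>
          if i' = i ∧ j' = j then max (dp (i-1) j) (dp i (j-1)) + pvGet s i j else dp i' j') dp)
      (pvC3 (pvg s) n m)
  = pvC4 (pvg s) n m k := by
  induction k with
  | zero =>
      have h0 : PySem.List.pyRange 1 ((0:Nat):Int) = [] := by decide
      rw [h0]
      funext i' j'
      simp only [List.foldl_nil, pvC4]
      rw [if_neg (by intro h; push_cast at h; omega)]
  | succ k ih =>
      by_cases hk0 : k = 0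
      · subst hk0
        have h1 : PySem.List.pyRange 1 (((0:Nat)+1:Nat):Int) = [] := by decide
        rw [h1]
        funext i' j'
        simp only [List.foldl_nil, pvC4]
        rw [if_neg (by intro h; push_cast at h; omega)]
      · have hr : PySem.List.pyRange 1 (((k+1:Nat)):Int) = PySem.List.pyRange 1 (k:Int) ++ [(k:Int)] := by
          push_cast
          exact PySem.List.pyRange_one_succ_right (by omega)
        rw [hr, List.foldl_append, ih (by omega)]
        simp only [List.foldl_cons, List.foldl_nil]
        rw [pv_inner s n m k (by omega) (by omega) m (le_refl m)]
        funext i' j'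
        by_cases h1 : i' = (k:Int) ∧ 1 ≤ j' ∧ j' < (m:Int)
        · rw [if_pos h1]
          simp only [pvC4]
          rw [if_pos ⟨by omega, by push_cast; omega, h1.2.1, h1.2.2⟩]
          obtain ⟨hi, _, _⟩ := h1; subst hi
          have e : ((k:Int)).toNat = k := by omega
          rw [e]
        · rw [if_neg h1]
          simp only [pvC4]
          by_cases h2 : 1 ≤ i' ∧ i' < (k:Int) ∧ 1 ≤ j' ∧ j' < (m:Int)
          · rw [if_pos h2, if_pos ⟨h2.1, by push_cast; omega, h2.2.2⟩]
          · rw [if_neg h2, if_neg (by intro h; push_cast at h h1 h2; exact h2 ⟨h.1, by omega, h.2.2⟩)]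

lemma pvC4_corner (g : Nat → Nat → Int) (n m : Nat) :
    pvC4 g n m n ((n:Int)-1) ((m:Int)-1)
      = if n = 0 ∨ m = 0 then 0 else pvF g (n-1) (m-1) := by
  have e1 : ((n:Int) - 1).toNat = n - 1 := by omega
  have e2 : ((m:Int) - 1).toNat = m - 1 := by omega
  simp only [pvC4, pvC3, pvC2, e1, e2]
  split_ifs <;>
    first
      | rfl
      | (exfalso; omega)
      | (congr 2 <;> omega)
      | (congr 1 <;> omega)

-- ===== B-side lemmas: the stack-driven memoization computes pvF =====
def pvGoodMemo (s : List (List Int)) (memo : PySem.Dict (Int × Int) Int) : Prop :=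
  ∀ p v, memo.get? p = some v → 0 ≤ p.1 ∧ 0 ≤ p.2 ∧ v = pvF (pvg s) p.1.toNat p.2.toNat

lemma pvRun_nil (s : List (List Int)) (fuel : Nat) (memo : PySem.Dict (Int × Int) Int) :
    pvRun s fuel memo [] = memo := by
  cases fuel <;> rfl

lemma pvTodo_eq (memo : PySem.Dict (Int × Int) Int) (i j : Int) : pvTodo memo (i, j) =
    (if 0 < i ∧ memo.contains (i - 1, j) = false then [(i - 1, j)] else [])
      ++ (if 0 < j ∧ memo.contains (i, j - 1) = false then [(i, j - 1)] else []) := rfl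

lemma pvVal_eq (memo : PySem.Dict (Int × Int) Int) (i j : Int) : pvVal memo (i, j) =
    if 0 < i ∧ 0 < j then max (memo.getD (i - 1, j) 0) (memo.getD (i, j - 1) 0)
    else if 0 < i then memo.getD (i - 1, j) 0
    else if 0 < j then memo.getD (i, j - 1) 0
    else 0 := rfl

lemma pvRun_step_pop (s : List (List Int)) (f : Nat) (memo : PySem.Dict (Int × Int) Int)
    (c : Int × Int) (rest : List (Int × Int)) (h : memo.contains c = true) :
    pvRun s (f+1) memo (c :: rest) = pvRun s f memo rest := by
  simp [pvRun, h]

lemma pvRun_step_push (s : List (List Int)) (f : Nat) (memo : PySem.Dict (Int × Int) Int)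
    (c : Int × Int) (rest : List (Int × Int)) (h : memo.contains c = false)
    (ht : pvTodo memo c ≠ []) :
    pvRun s (f+1) memo (c :: rest) = pvRun s f memo ((pvTodo memo c).reverse ++ c :: rest) := by
  simp [pvRun, h, ht]

lemma pvRun_step_compute (s : List (List Int)) (f : Nat) (memo : PySem.Dict (Int × Int) Int)
    (c : Int × Int) (rest : List (Int × Int)) (h : memo.contains c = false)
    (ht : pvTodo memo c = []) :
    pvRun s (f+1) memo (c :: rest)
      = pvRun s f (memo.insert c (pvVal memo c + pvGet s c.1 c.2)) rest := by
  simp [pvRun, h, ht]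

-- one compute step: both dependencies (where they exist) are cached, so the cell is filled correctly
lemma pv_compute (s : List (List Int)) (i j : Int) (hi : 0 ≤ i) (hj : 0 ≤ j)
    (memo : PySem.Dict (Int × Int) Int) (hG : pvGoodMemo s memo)
    (hup : 0 < i → memo.contains (i-1, j) = true)
    (hleft : 0 < j → memo.contains (i, j-1) = true) :
    pvVal memo (i, j) + pvGet s i j = pvF (pvg s) i.toNat j.toNat ∧
    pvGoodMemo s (memo.insert (i, j) (pvVal memo (i, j) + pvGet s i j)) := by
  have hgv : ∀ (p : Int × Int), memo.contains p = true → memo.getD p 0 = pvF (pvg s) p.1.toNat p.2.toNat := by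
    intro p hc
    rw [PySem.Dict.contains_eq_isSome_get?] at hc
    obtain ⟨v, hv⟩ := Option.isSome_iff_exists.mp hc
    rw [PySem.Dict.getD_of_get?_eq_some _ _ hv]
    exact (hG p v hv).2.2
  have hcell : pvGet s i j = pvg s i.toNat j.toNat := by
    simp only [pvg]
    congr 1 <;> omega
  have hval : pvVal memo (i, j) + pvGet s i j = pvF (pvg s) i.toNat j.toNat := by
    rw [pvVal_eq]
    by_cases h1 : 0 < i
    · by_cases h2 : 0 < j
      · rw [if_pos ⟨h1, h2⟩, hgv _ (hup h1), hgv _ (hleft h2), hcell]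
        have e1 : (i - 1).toNat = i.toNat - 1 := by omega
        have e2 : (j - 1).toNat = j.toNat - 1 := by omega
        rw [e1, e2, pvF_ss (pvg s) i.toNat j.toNat (by omega) (by omega)]
      · rw [if_neg (by omega), if_pos h1, hgv _ (hup h1), hcell]
        have e1 : (i - 1).toNat = i.toNat - 1 := by omega
        have e3 : j.toNat = 0 := by omega
        rw [e1, e3, pvF_s0 (pvg s) i.toNat (by omega)]
    · by_cases h2 : 0 < j
      · rw [if_neg (by omega), if_neg h1, if_pos h2, hgv _ (hleft h2), hcell]
        have e1 : i.toNat = 0 := by omega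
        have e2 : (j - 1).toNat = j.toNat - 1 := by omega
        rw [e1, e2, pvF_0s (pvg s) j.toNat (by omega)]
      · rw [if_neg (by omega), if_neg h1, if_neg h2, hcell]
        have e1 : i.toNat = 0 := by omega
        have e2 : j.toNat = 0 := by omega
        rw [e1, e2]
        simp [pvF]
  refine ⟨hval, ?_⟩
  intro p v hv
  rw [PySem.Dict.get?_insert] at hv
  by_cases hp : p = (i, j)
  · rw [if_pos hp] at hv
    subst hp
    injection hv with hv'
    exact ⟨hi, hj, by rw [← hv']; exact hval⟩
  · rw [if_neg hp] at hv
    exact hG p v hv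

-- the main invariant: visiting a cell resolves it, with bounded fuel consumption
lemma pv_resolve (s : List (List Int)) : ∀ (K : Nat) (i j : Int), i.toNat + j.toNat < K → 0 ≤ i → 0 ≤ j →
    ∀ (memo : PySem.Dict (Int × Int) Int) (rest : List (Int × Int)) (fuel : Nat),
    pvGoodMemo s memo → pvFuel i j ≤ fuel →
    ∃ fuel' memo', pvRun s fuel memo ((i, j) :: rest) = pvRun s fuel' memo' rest
      ∧ fuel - pvFuel i j ≤ fuel'
      ∧ pvGoodMemo s memo'
      ∧ (∀ p, memo.contains p = true → memo'.contains p = true)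
      ∧ memo'.get? (i, j) = some (pvF (pvg s) i.toNat j.toNat) := by
  intro K
  induction K with
  | zero => intro i j h; omega
  | succ K ih =>
    intro i j hK hi hj memo rest fuel hG hfuel
    have hx3 : 3 ≤ 3 ^ (i.toNat + j.toNat + 1) := by
      calc (3:Nat) = 3 ^ 1 := by norm_num
      _ ≤ 3 ^ (i.toNat + j.toNat + 1) := Nat.pow_le_pow_right (by norm_num) (by omega)
    have hxF : 3 ≤ pvFuel i j := by simpa [pvFuel] using hx3
    obtain ⟨f, rfl⟩ : ∃ f, fuel = f + 1 := ⟨fuel - 1, by omega⟩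
    by_cases hc : memo.contains (i, j) = true
    · -- cached: pop
      have hstep := pvRun_step_pop s f memo (i, j) rest hc
      rw [PySem.Dict.contains_eq_isSome_get?] at hc
      obtain ⟨v, hv⟩ := Option.isSome_iff_exists.mp hc
      refine ⟨f, memo, hstep, by omega, hG, fun p h => h, ?_⟩
      rw [hv]
      exact congrArg some (hG _ v hv).2.2
    · have hcf : memo.contains (i, j) = false := by simpa using hc
      by_cases ht : pvTodo memo (i, j) = []
      · -- dependencies cached: compute and pop
        have hup : 0 < i → memo.contains (i-1, j) = true := by
          intro h1
          by_contra hcu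
          have hcu' : memo.contains (i-1, j) = false := by simpa using hcu
          have hne : pvTodo memo (i, j) ≠ [] := by
            rw [pvTodo_eq, if_pos ⟨h1, hcu'⟩]
            simp
          exact hne ht
        have hleft : 0 < j → memo.contains (i, j-1) = true := by
          intro h2
          by_contra hcu
          have hcu' : memo.contains (i, j-1) = false := by simpa using hcu
          have hne : pvTodo memo (i, j) ≠ [] := by
            rw [pvTodo_eq, if_pos (⟨h2, hcu'⟩ : 0 < j ∧ memo.contains (i, j-1) = false)]
            simp
          exact hne ht
        obtain ⟨hval, hG'⟩ := pv_compute s i j hi hj memo hG hup hleft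
        have hstep := pvRun_step_compute s f memo (i, j) rest hcf ht
        refine ⟨f, _, hstep, by omega, hG', ?_, ?_⟩
        · intro p hp
          rw [PySem.Dict.contains_insert, hp]
          simp
        · rw [PySem.Dict.get?_insert_self]
          exact congrArg some hval
      · -- missing dependencies: push them, resolve them, revisit
        have hS1 : 1 ≤ i.toNat + j.toNat := by
          by_contra h
          have hempty : pvTodo memo (i, j) = [] := by
            rw [pvTodo_eq, if_neg (by intro h'; omega), if_neg (by intro h'; omega)]
            rfl
          exact ht hempty
        have hstep := pvRun_step_push s f memo (i, j) rest hcf ht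
        set S := i.toNat + j.toNat with hSdef
        have hFij : pvFuel i j = 3 * 3 ^ S := by
          simp [pvFuel, pow_succ, Nat.mul_comm, hSdef]
        have hFdep_up : 0 < i → pvFuel (i-1) j = 3 ^ S := by
          intro h1
          simp only [pvFuel]
          congr 1
          omega
        have hFdep_left : 0 < j → pvFuel i (j-1) = 3 ^ S := by
          intro h2
          simp only [pvFuel]
          congr 1
          omega
        have hx : 3 ≤ 3 ^ S := by
          calc (3:Nat) = 3 ^ 1 := by norm_num
          _ ≤ 3 ^ S := Nat.pow_le_pow_right (by norm_num) hS1
        have hfuelS : 3 * 3 ^ S ≤ f + 1 := by rw [← hFij]; exact hfuel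
        by_cases h1 : 0 < i ∧ memo.contains (i-1, j) = false
        · by_cases h2 : 0 < j ∧ memo.contains (i, j-1) = false
          · -- todo = [up, left]; reversed: left is on top
            have htodo : (pvTodo memo (i,j)).reverse = [(i, j-1), (i-1, j)] := by
              rw [pvTodo_eq, if_pos h1, if_pos h2]
              rfl
            rw [htodo] at hstep
            simp only [List.cons_append, List.nil_append] at hstep
            obtain ⟨f1, m1, e1, hf1, hG1, hmono1, hget1⟩ :=
              ih i (j-1) (by omega) hi (by omega) memo ((i-1,j)::(i,j)::rest) f hG
                (by rw [hFdep_left h2.1]; omega)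
            rw [hFdep_left h2.1] at hf1
            obtain ⟨f2, m2, e2, hf2, hG2, hmono2, hget2⟩ :=
              ih (i-1) j (by omega) (by omega) hj m1 ((i,j)::rest) f1 hG1
                (by rw [hFdep_up h1.1]; omega)
            rw [hFdep_up h1.1] at hf2
            obtain ⟨f3, rfl⟩ : ∃ f3, f2 = f3 + 1 := ⟨f2 - 1, by omega⟩
            have hupc : m2.contains (i-1, j) = true := by
              rw [PySem.Dict.contains_eq_isSome_get?, hget2]; rfl
            have hleftc : m2.contains (i, j-1) = true :=
              hmono2 (i, j-1) (by rw [PySem.Dict.contains_eq_isSome_get?, hget1]; rfl)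
            by_cases hc2 : m2.contains (i, j) = true
            · have hstep2 := pvRun_step_pop s f3 m2 (i, j) rest hc2
              rw [PySem.Dict.contains_eq_isSome_get?] at hc2
              obtain ⟨v, hv⟩ := Option.isSome_iff_exists.mp hc2
              refine ⟨f3, m2, ?_, by rw [hFij]; omega, hG2,
                fun p hp => hmono2 p (hmono1 p hp), ?_⟩
              · rw [hstep, e1, e2, hstep2]
              · rw [hv]
                exact congrArg some (hG2 _ v hv).2.2
            · have hc2f : m2.contains (i, j) = false := by simpa using hc2
              have ht2 : pvTodo m2 (i, j) = [] := by
                rw [pvTodo_eq, if_neg (by rw [hupc]; rintro ⟨-, h'⟩; simp at h'),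
                    if_neg (by rw [hleftc]; rintro ⟨-, h'⟩; simp at h')]
                rfl
              obtain ⟨hval, hG'⟩ := pv_compute s i j hi hj m2 hG2 (fun _ => hupc) (fun _ => hleftc)
              have hstep2 := pvRun_step_compute s f3 m2 (i, j) rest hc2f ht2
              refine ⟨f3, _, ?_, by rw [hFij]; omega, hG', ?_, ?_⟩
              · rw [hstep, e1, e2, hstep2]
              · intro p hp
                rw [PySem.Dict.contains_insert, hmono2 p (hmono1 p hp)]
                simp
              · rw [PySem.Dict.get?_insert_self]
                exact congrArg some hval
          · -- todo = [up]
            have htodo : (pvTodo memo (i,j)).reverse = [(i-1, j)] := by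
              rw [pvTodo_eq, if_pos h1, if_neg h2]
              rfl
            rw [htodo] at hstep
            simp only [List.cons_append, List.nil_append] at hstep
            obtain ⟨f2, m2, e2, hf2, hG2, hmono2, hget2⟩ :=
              ih (i-1) j (by omega) (by omega) hj memo ((i,j)::rest) f hG
                (by rw [hFdep_up h1.1]; omega)
            rw [hFdep_up h1.1] at hf2
            obtain ⟨f3, rfl⟩ : ∃ f3, f2 = f3 + 1 := ⟨f2 - 1, by omega⟩
            have hupc : m2.contains (i-1, j) = true := by
              rw [PySem.Dict.contains_eq_isSome_get?, hget2]; rfl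
            have hleftc : 0 < j → m2.contains (i, j-1) = true := by
              intro hjj
              refine hmono2 _ ?_
              by_contra hcc
              exact h2 ⟨hjj, by simpa using hcc⟩
            by_cases hc2 : m2.contains (i, j) = true
            · have hstep2 := pvRun_step_pop s f3 m2 (i, j) rest hc2
              rw [PySem.Dict.contains_eq_isSome_get?] at hc2
              obtain ⟨v, hv⟩ := Option.isSome_iff_exists.mp hc2
              refine ⟨f3, m2, ?_, by rw [hFij]; omega, hG2, fun p hp => hmono2 p hp, ?_⟩
              · rw [hstep, e2, hstep2]
              · rw [hv]
                exact congrArg some (hG2 _ v hv).2.2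
            · have hc2f : m2.contains (i, j) = false := by simpa using hc2
              have ht2 : pvTodo m2 (i, j) = [] := by
                rw [pvTodo_eq, if_neg (by rw [hupc]; rintro ⟨-, h'⟩; simp at h'),
                    if_neg (by rintro ⟨hjj, h'⟩; rw [hleftc hjj] at h'; simp at h')]
                rfl
              obtain ⟨hval, hG'⟩ := pv_compute s i j hi hj m2 hG2 (fun _ => hupc) hleftc
              have hstep2 := pvRun_step_compute s f3 m2 (i, j) rest hc2f ht2
              refine ⟨f3, _, ?_, by rw [hFij]; omega, hG', ?_, ?_⟩
              · rw [hstep, e2, hstep2]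
              · intro p hp
                rw [PySem.Dict.contains_insert, hmono2 p hp]
                simp
              · rw [PySem.Dict.get?_insert_self]
                exact congrArg some hval
        · -- todo = [left] (todo nonempty and no up entry forces the left entry)
          have h2 : 0 < j ∧ memo.contains (i, j-1) = false := by
            by_contra h2
            have hempty : pvTodo memo (i,j) = [] := by
              rw [pvTodo_eq, if_neg h1, if_neg h2]
              rfl
            exact ht hempty
          have htodo : (pvTodo memo (i,j)).reverse = [(i, j-1)] := by
            rw [pvTodo_eq, if_neg h1, if_pos h2]
            rfl
          rw [htodo] at hstep
          simp only [List.cons_append, List.nil_append] at hstep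
          obtain ⟨f2, m2, e2, hf2, hG2, hmono2, hget2⟩ :=
            ih i (j-1) (by omega) hi (by omega) memo ((i,j)::rest) f hG
              (by rw [hFdep_left h2.1]; omega)
          rw [hFdep_left h2.1] at hf2
          obtain ⟨f3, rfl⟩ : ∃ f3, f2 = f3 + 1 := ⟨f2 - 1, by omega⟩
          have hleftc : m2.contains (i, j-1) = true := by
            rw [PySem.Dict.contains_eq_isSome_get?, hget2]; rfl
          have hupc : 0 < i → m2.contains (i-1, j) = true := by
            intro hii
            refine hmono2 _ ?_
            by_contra hcc
            exact h1 ⟨hii, by simpa using hcc⟩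
          by_cases hc2 : m2.contains (i, j) = true
          · have hstep2 := pvRun_step_pop s f3 m2 (i, j) rest hc2
            rw [PySem.Dict.contains_eq_isSome_get?] at hc2
            obtain ⟨v, hv⟩ := Option.isSome_iff_exists.mp hc2
            refine ⟨f3, m2, ?_, by rw [hFij]; omega, hG2, fun p hp => hmono2 p hp, ?_⟩
            · rw [hstep, e2, hstep2]
            · rw [hv]
              exact congrArg some (hG2 _ v hv).2.2
          · have hc2f : m2.contains (i, j) = false := by simpa using hc2
            have ht2 : pvTodo m2 (i, j) = [] := by
              rw [pvTodo_eq, if_neg (by rintro ⟨hii, h'⟩; rw [hupc hii] at h'; simp at h'),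
                  if_neg (by rw [hleftc]; rintro ⟨-, h'⟩; simp at h')]
              rfl
            obtain ⟨hval, hG'⟩ := pv_compute s i j hi hj m2 hG2 hupc (fun _ => hleftc)
            have hstep2 := pvRun_step_compute s f3 m2 (i, j) rest hc2f ht2
            refine ⟨f3, _, ?_, by rw [hFij]; omega, hG', ?_, ?_⟩
            · rw [hstep, e2, hstep2]
            · intro p hp
              rw [PySem.Dict.contains_insert, hmono2 p hp]
              simp
            · rw [PySem.Dict.get?_insert_self]
              exact congrArg some hval

lemma pv_alt_eq_pvF (s : List (List Int)) (hn : s.length ≠ 0)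
    (hm : (PySem.List.pyGetD s 0 []).length ≠ 0) :
    uretim_planlama_suresi_alt s = pvF (pvg s) (s.length - 1) ((PySem.List.pyGetD s 0 []).length - 1) := by
  simp only [uretim_planlama_suresi_alt]
  set n : Int := (s.length : Int) with hndef
  set m : Int := ((PySem.List.pyGetD s 0 []).length : Int) with hmdef
  have hi : 0 ≤ n - 1 := by omega
  have hj : 0 ≤ m - 1 := by omega
  have hGe : pvGoodMemo s PySem.Dict.empty := by
    intro p v hv
    rw [PySem.Dict.get?_empty] at hv
    exact absurd hv (by simp)
  obtain ⟨f', m', e, _, _, _, hget⟩ :=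
    pv_resolve s ((n-1).toNat + (m-1).toNat + 1) (n-1) (m-1) (by omega) hi hj
      PySem.Dict.empty [] (pvFuel (n-1) (m-1)) hGe (le_refl _)
  rw [e, pvRun_nil, PySem.Dict.getD_of_get?_eq_some _ _ hget]
  congr 1 <;> omega

lemma pv_total (s : List (List Int)) (hP : Pre_uretim_planlama_suresi s) :
    uretim_planlama_suresi s = uretim_planlama_suresi_alt s := by
  obtain ⟨hne, hrow, _⟩ := hP
  have hn : s.length ≠ 0 := by simpa using hne
  have hm : (PySem.List.pyGetD s 0 []).length ≠ 0 := by
    have : PySem.List.pyGetD s 0 [] = s.headD [] := by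
      cases s with
      | nil => simp at hne
      | cons a t => simp [PySem.List.pyGetD, PySem.List.pyGet?, PySem.List.pyIdx?]
    rw [this]
    simpa using hrow
  rw [pv_alt_eq_pvF s hn hm]
  simp only [uretim_planlama_suresi]
  rw [pv_phase2 s, pv_phase3 s, pv_phase4 s s.length _ s.length (le_refl _), pvC4_corner]
  rw [if_neg (by omega)]

-- ===== VERDICT (by name: the statement is the Claim_ definition above) =====
theorem uretim_planlama_suresi_spec : Claim_equal_uretim_planlama_suresi := by
  intro sureler _ hP
  unfold Spec_uretim_planlama_suresi
  exact pv_total sureler hP
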